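-- pv_equiv track=rewrite | github.com/DJMcClellan1966/ai4everyone | corpus/architecture_optimizer.py | _detect_amd_features
-- ===== SOURCE A (Python) =====
-- from typing import Dict, List, Any, Optional, Tuple
--
-- def _detect_amd_features(features: List[str]) -> str:
--     """Detect AMD-specific features"""
--     features_lower = [f.lower() for f in features]
--
--     if 'avx2' in ' '.join(features_lower) or any('avx2' in f for f in features_lower):
--         return 'avx2'  # Good optimization
--     elif 'avx' in ' '.join(features_lower) or any('avx' in f for f in features_lower):
--         return 'avx'  # Basic optimization
--     else:
--         return 'sse'  # Fallback
-- ===== SOURCE B (Python) =====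
-- from typing import List
--
-- def _detect_amd_features(features: List[str]) -> str:
--     """Detect AMD-specific features (single pass)."""
--     found_avx = False
--     for f in features:
--         fl = f.lower()
--         if 'avx2' in fl:
--             return 'avx2'
--         if 'avx' in fl:
--             found_avx = True
--     return 'avx' if found_avx else 'sse'
-- ===== Notes on version B (the rewrite author's own statement) =====
-- stated objective: simpler
-- what changed: Replaces A's build-a-joined-string plus four separate scans (two joins, two any-generators) with one traversal that returns 'avx2' immediately and otherwise maintains a found-avx flag.
import Mathlib
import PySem

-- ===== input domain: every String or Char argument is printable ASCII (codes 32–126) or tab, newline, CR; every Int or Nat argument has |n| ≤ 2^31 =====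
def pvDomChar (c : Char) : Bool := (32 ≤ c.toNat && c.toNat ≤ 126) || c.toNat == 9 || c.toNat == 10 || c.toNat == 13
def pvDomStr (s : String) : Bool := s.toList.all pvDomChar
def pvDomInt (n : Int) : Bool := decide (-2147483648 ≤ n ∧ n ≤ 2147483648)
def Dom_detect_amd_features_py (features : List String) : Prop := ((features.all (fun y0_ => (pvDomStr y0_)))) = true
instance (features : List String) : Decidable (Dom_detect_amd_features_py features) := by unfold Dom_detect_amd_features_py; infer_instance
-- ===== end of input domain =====

-- B is a single pass with an early return and a found-avx flag, instead of A's joined string plus repeated scans.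

-- ===== PORT A =====
def detect_amd_features_py (features : List String) : String :=
  let features_lower := features.map PySem.Str.lower
  if PySem.Str.isIn "avx2" (PySem.Str.join " " features_lower)
      || features_lower.any (fun f => PySem.Str.isIn "avx2" f) then
    "avx2"
  else if PySem.Str.isIn "avx" (PySem.Str.join " " features_lower)
      || features_lower.any (fun f => PySem.Str.isIn "avx" f) then
    "avx"
  else
    "sse"

-- ===== PORT B =====
-- the 'for f in features' loop of Source B, carrying the found_avx flag
def detectLoop : List String → Bool → String
  | [], found_avx => if found_avx then "avx" else "sse"
  | f :: rest, found_avx =>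
    let fl := PySem.Str.lower f
    if PySem.Str.isIn "avx2" fl then "avx2"
    else detectLoop rest (found_avx || PySem.Str.isIn "avx" fl)

def detect_amd_features_py_alt (features : List String) : String :=
  detectLoop features false

-- ===== PRECONDITION & SPEC =====
def Spec_detect_amd_features_py (features : List String) (out : String) : Prop := out = detect_amd_features_py_alt features
instance (features : List String) (out : String) : Decidable (Spec_detect_amd_features_py features out) := by unfold Spec_detect_amd_features_py; infer_instance

-- ===== CLAIM (what is proved, stated in full; the proofs are below) =====
def Claim_equal_detect_amd_features_py : Prop := ∀ (features : List String), Dom_detect_amd_features_py features → Spec_detect_amd_features_py features (detect_amd_features_py features)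

-- ===== LEMMAS AND PROOFS =====

-- an occurrence of sub inside a ++ c :: b cannot straddle c when c ∉ sub
lemma isIn_append_cons (sub a b : List Char) (c : Char) (hc : c ∉ sub) :
    PySem.Chars.isIn sub (a ++ c :: b) = (PySem.Chars.isIn sub a || PySem.Chars.isIn sub b) := by
  by_cases h : PySem.Chars.isIn sub (a ++ c :: b) = true
  · rw [h]
    rw [← PySem.Chars.exists_prefix_drop_iff_isIn] at h
    obtain ⟨j, hpre⟩ := h
    by_cases hj : j ≤ a.length
    · rw [List.drop_append_of_le_length hj] at hpre
      by_cases hl' : sub.length ≤ (a.drop j).length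
      · -- sub is a prefix of a.drop j, hence infix of a
        have hsub : sub <+: a.drop j := by
          have heq : sub = ((a.drop j) ++ c :: b).take sub.length := by
            obtain ⟨t, ht⟩ := hpre
            rw [← ht]; simp
          rw [List.take_append_of_le_length hl'] at heq
          rw [heq]; exact List.take_prefix _ _
        have : PySem.Chars.isIn sub a = true := by
          rw [← PySem.Chars.exists_prefix_drop_iff_isIn]; exact ⟨j, hsub⟩
        simp [this]
      · -- sub would contain c : contradiction
        exfalso
        have hl : (a.drop j).length < sub.length := by omega
        have hgetp := hpre.getElem (i := (a.drop j).length) hl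
        have hcm : sub[(a.drop j).length]'hl = c := by rw [hgetp]; simp
        exact hc (hcm ▸ List.getElem_mem hl)
    · -- the occurrence starts strictly inside b
      obtain ⟨k, rfl⟩ : ∃ k, j = a.length + (k + 1) := ⟨j - a.length - 1, by omega⟩
      have hdrop : (a ++ c :: b).drop (a.length + (k + 1)) = b.drop k := by
        simp [List.drop_append]
      rw [hdrop] at hpre
      have : PySem.Chars.isIn sub b = true := by
        rw [← PySem.Chars.exists_prefix_drop_iff_isIn]; exact ⟨k, hpre⟩
      simp [this]
  · have h' : PySem.Chars.isIn sub (a ++ c :: b) = false := eq_false_of_ne_true h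
    rw [h']
    rw [PySem.Chars.isIn_eq_false_iff] at h'
    have ha : PySem.Chars.isIn sub a = false := by
      rw [PySem.Chars.isIn_eq_false_iff]
      intro hin
      exact h' (hin.trans (List.prefix_append a (c :: b)).isInfix)
    have hb : PySem.Chars.isIn sub b = false := by
      rw [PySem.Chars.isIn_eq_false_iff]
      intro hin
      exact h' (hin.trans ((List.suffix_cons c b).trans (List.suffix_append a (c :: b))).isInfix)
    simp [ha, hb]

-- 'sub in " ".join(fs)' is 'any(sub in f)' when sub is nonempty and space-free
lemma isIn_join_space (sub : List Char) (hne : sub ≠ []) (hc : (' ' : Char) ∉ sub) :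
    ∀ fs : List (List Char),
      PySem.Chars.isIn sub (PySem.Chars.join [' '] fs) = fs.any (fun f => PySem.Chars.isIn sub f)
  | [] => by
    rw [PySem.Chars.join_nil]
    have : PySem.Chars.isIn sub [] = false := by
      rw [PySem.Chars.isIn_eq_false_iff]
      intro hin
      exact hne (List.eq_nil_of_infix_nil hin)
    simp [this]
  | [p] => by rw [PySem.Chars.join_singleton]; simp
  | p :: q :: rest => by
    rw [PySem.Chars.join_cons_cons]
    have hsplit : p ++ [' '] ++ PySem.Chars.join [' '] (q :: rest)
        = p ++ ' ' :: PySem.Chars.join [' '] (q :: rest) := by simp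
    rw [hsplit, isIn_append_cons sub p _ ' ' hc, isIn_join_space sub hne hc (q :: rest)]
    simp

-- A's branch condition collapses to the plain 'any' over the lowered features
lemma cond_eq (sub : String) (hne : sub.toList ≠ []) (hc : (' ' : Char) ∉ sub.toList)
    (ls : List String) :
    (PySem.Str.isIn sub (PySem.Str.join " " ls) || ls.any (fun f => PySem.Str.isIn sub f))
      = ls.any (fun f => PySem.Str.isIn sub f) := by
  have hj : PySem.Str.isIn sub (PySem.Str.join " " ls) = ls.any (fun f => PySem.Str.isIn sub f) := by
    have h1 : PySem.Str.isIn sub (PySem.Str.join " " ls)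
        = PySem.Chars.isIn sub.toList (PySem.Chars.join [' '] (ls.map String.toList)) := by
      simp [PySem.Str.toList_join]
    rw [h1, isIn_join_space sub.toList hne hc]
    simp [List.any_map, Function.comp_def]
  rw [hj, Bool.or_self]

-- B's loop, characterised by what remains of the list and the flag
lemma detectLoop_eq (fs : List String) (found : Bool) :
    detectLoop fs found =
      if fs.any (fun f => PySem.Str.isIn "avx2" (PySem.Str.lower f)) then "avx2"
      else if found || fs.any (fun f => PySem.Str.isIn "avx" (PySem.Str.lower f)) then "avx"
      else "sse" := by
  induction fs generalizing found with
  | nil => simp [detectLoop]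
  | cons f rest ih =>
    by_cases h2 : PySem.Chars.isIn ['a','v','x','2'] (PySem.Chars.lower f.toList) = true
    · simp [detectLoop, h2]
    · by_cases h3 : PySem.Chars.isIn ['a','v','x'] (PySem.Chars.lower f.toList) = true
      · simp [detectLoop, h2, h3, ih]
      · simp [detectLoop, h2, h3, ih]

-- ===== VERDICT (by name: the statement is the Claim_ definition above) =====
theorem detect_amd_features_py_spec : Claim_equal_detect_amd_features_py := by
  intro features _
  unfold Spec_detect_amd_features_py detect_amd_features_py detect_amd_features_py_alt
  rw [detectLoop_eq]
  simp only []
  rw [cond_eq "avx2" (by decide) (by decide), cond_eq "avx" (by decide) (by decide)]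
  simp [List.any_map, Function.comp_def]
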